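-- pv_equiv track=rewrite | github.com/at0rp1d0i-cell/Pixiu | src/hypothesis/mutation.py | _next_horizon
-- ===== SOURCE A (Python) =====
-- _HORIZON_CANDIDATES = [5, 10, 20, 40, 60, 120]
--
-- def _next_horizon(current: int) -> int:
--     """返回 _HORIZON_CANDIDATES 中 current 的下一个候选（循环）。"""
--     candidates = _HORIZON_CANDIDATES
--     # 找最近的候选
--     for i, c in enumerate(candidates):
--         if c == current:
--             return candidates[(i + 1) % len(candidates)]
--     # 不在标准候选中：找下一个更大的候选
--     for c in candidates:
--         if c > current:
--             return c
--     return candidates[0]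
-- ===== SOURCE B (Python) =====
-- _HORIZON_CANDIDATES = [5, 10, 20, 40, 60, 120]
--
-- def _next_horizon(current: int) -> int:
--     """返回 _HORIZON_CANDIDATES 中 current 的下一个候选（循环）。"""
--     return next((c for c in _HORIZON_CANDIDATES if c > current), _HORIZON_CANDIDATES[0])
-- ===== Notes on version B (the rewrite author's own statement) =====
-- stated objective: simpler
-- what changed: Replaces A's two loops (equality scan with cyclic-index lookup, then a greater-than scan) with a single first-greater-than scan with a wrap-around default, correct because the candidate list is sorted and distinct.
import Mathlib
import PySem

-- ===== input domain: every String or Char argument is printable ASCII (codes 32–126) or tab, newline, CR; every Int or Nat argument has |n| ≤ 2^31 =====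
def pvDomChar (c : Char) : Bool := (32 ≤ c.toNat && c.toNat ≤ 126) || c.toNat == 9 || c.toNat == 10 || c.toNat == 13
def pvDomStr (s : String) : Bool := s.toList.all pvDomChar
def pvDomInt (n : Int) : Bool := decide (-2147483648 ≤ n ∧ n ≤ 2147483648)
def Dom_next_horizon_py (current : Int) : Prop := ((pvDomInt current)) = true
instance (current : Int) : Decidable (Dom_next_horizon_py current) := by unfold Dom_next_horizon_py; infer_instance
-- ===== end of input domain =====

-- B: one first-greater-than scan with wrap-around default replaces A's two loops (simpler); return-value equivalence proved below.
-- ===== PORT A =====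
def horizonCandidates : List Int := [5, 10, 20, 40, 60, 120]

-- first loop of A: for i, c in enumerate(candidates): if c == current: return candidates[(i+1) % len(candidates)]
def nhLoopEq (candidates : List Int) (current : Int) : List (Int × Int) → Option Int
  | [] => none
  | (i, c) :: rest =>
      if c == current then
        (PySem.List.pyGet? candidates (PySem.Int.mod (i + 1) (candidates.length : Int))).getD 0
        -- candidates[(i+1) % len]: index is always in range here, so .getD 0 is never taken
      else nhLoopEq candidates current rest

-- second loop of A: for c in candidates: if c > current: return c
def nhLoopGt (current : Int) : List Int → Option Int
  | [] => none
  | c :: rest => if c > current then some c else nhLoopGt current rest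

def next_horizon_py (current : Int) : Int :=
  let candidates := horizonCandidates
  match nhLoopEq candidates current (PySem.List.enumerate candidates) with
  | some r => r
  | none =>
    match nhLoopGt current candidates with
    | some c => c
    | none => (PySem.List.pyGet? candidates 0).getD 0  -- candidates[0], list nonempty

-- ===== PORT B =====
def next_horizon_py_alt (current : Int) : Int :=
  (horizonCandidates.find? (fun c => current < c)).getD ((PySem.List.pyGet? horizonCandidates 0).getD 0)

-- ===== PRECONDITION & SPEC =====
def Spec_next_horizon_py (current : Int) (out : Int) : Prop := out = next_horizon_py_alt current
instance (current : Int) (out : Int) : Decidable (Spec_next_horizon_py current out) := by unfold Spec_next_horizon_py; infer_instance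

-- ===== CLAIM (what is proved, stated in full; the proofs are below) =====
def Claim_equal_next_horizon_py : Prop := ∀ (current : Int), Dom_next_horizon_py current → Spec_next_horizon_py current (next_horizon_py current)

-- ===== LEMMAS AND PROOFS =====

-- ===== VERDICT (by name: the statement is the Claim_ definition above) =====
set_option maxHeartbeats 2000000 in
theorem next_horizon_py_spec : Claim_equal_next_horizon_py := by
  intro current _
  unfold Spec_next_horizon_py next_horizon_py next_horizon_py_alt
  simp only [horizonCandidates, PySem.List.enumerate, nhLoopEq, nhLoopGt, List.find?, beq_iff_eq]
  split_ifs with h1 h2 h3 h4 h5 h6 <;>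
    first
      | (first | subst h1 | subst h2 | subst h3 | subst h4 | subst h5 | subst h6); rfl
      | (repeat' split) <;> simp_all <;> omega
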